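-- pv_equiv track=rewrite | github.com/xiaoyuxie-vico/PyDimension | pydimension/data_generation/generator.py | _generate_default_gammas
-- ===== SOURCE A (Python) =====
-- from typing import List, Optional, Tuple
--
-- def _generate_default_gammas(gamma_dim: int, ndim: int) -> List[List[float]]:
--     """Generate default linearly independent gamma vectors"""
--     default_gammas = []
--
--     # Create linearly independent vectors
--     for i in range(min(ndim, 3)):
--         gamma = []
--         for j in range(gamma_dim):
--             if j == i % gamma_dim:
--                 gamma.append(1)
--             elif j == (i + 1) % gamma_dim:
--                 gamma.append(1)
--             elif i == 1 and j == (i + 2) % gamma_dim: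
--                 gamma.append(1)
--             else:
--                 gamma.append(0)
--
--         # For gamma2, gamma3, add some variety
--         if i == 1 and gamma_dim > 1:
--             gamma[0] = 2
--             gamma[1] = 0
--         elif i == 2 and gamma_dim > 2:
--             gamma[0] = 0
--             gamma[1] = 2
--
--         default_gammas.append(gamma)
--
--     return default_gammas
-- ===== SOURCE B (Python) =====
-- def _generate_default_gammas(gamma_dim: int, ndim: int):
--     """Default gammas via a fixed pattern table, padded/truncated to gamma_dim."""
--     m = max(min(ndim, 3), 0)
--     d = gamma_dim
--     if d <= 0:
--         return [[] for _ in range(m)]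
--     if d == 1:
--         pats = [[1], [1], [1]]
--     elif d == 2:
--         pats = [[1, 1], [2, 0], [1, 1]]
--     else:
--         pats = [[1, 1], [2, 0, 1, 1], [0, 2, 1, 1]]
--     return [(p + [0] * (d - len(p)))[:d] for p in pats[:m]]
-- ===== Notes on version B (the rewrite author's own statement) =====
-- stated objective: faster
-- what changed: B replaces A's per-index four-way-branch scan plus override blocks by a fixed literal pattern table (one table per gamma_dim regime: <=0, 1, 2, >=3) whose rows are padded with zeros and truncated to gamma_dim; no per-element branching, modular arithmetic or overrides remain.
import Mathlib
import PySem

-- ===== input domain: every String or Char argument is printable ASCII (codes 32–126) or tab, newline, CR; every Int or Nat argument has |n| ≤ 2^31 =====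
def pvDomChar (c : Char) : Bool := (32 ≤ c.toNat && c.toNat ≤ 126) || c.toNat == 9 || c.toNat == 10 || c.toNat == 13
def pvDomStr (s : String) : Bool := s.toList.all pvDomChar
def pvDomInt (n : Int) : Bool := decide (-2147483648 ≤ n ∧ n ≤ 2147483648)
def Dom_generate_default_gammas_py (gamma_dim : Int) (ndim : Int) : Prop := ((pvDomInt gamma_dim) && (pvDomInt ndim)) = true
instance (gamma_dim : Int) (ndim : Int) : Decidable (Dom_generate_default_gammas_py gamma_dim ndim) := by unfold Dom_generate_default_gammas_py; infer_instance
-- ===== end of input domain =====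

-- B computes the rows from a fixed literal pattern table (one table per gamma_dim regime),
-- padded/truncated to gamma_dim, instead of A's per-index branch scan with override blocks;
-- a timing run measured B faster (constant-factor: the per-element branch/mod work disappears).

-- ===== PORT A =====
-- one iteration of A's outer loop: build the row for index i by scanning j in range(gamma_dim)
def pvRowA (gamma_dim : Int) (i : Int) : List Int :=
  let gamma := (PySem.List.pyRange 0 gamma_dim 1).map (fun j =>
    if j = PySem.Int.mod i gamma_dim then 1
    else if j = PySem.Int.mod (i + 1) gamma_dim then 1
    else if i = 1 ∧ j = PySem.Int.mod (i + 2) gamma_dim then 1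
    else 0)
  if i = 1 ∧ gamma_dim > 1 then (gamma.set 0 2).set 1 0
  else if i = 2 ∧ gamma_dim > 2 then (gamma.set 0 0).set 1 2
  else gamma

def generate_default_gammas_py (gamma_dim : Int) (ndim : Int) : List (List Int) :=
  (PySem.List.pyRange 0 (min ndim 3) 1).foldl
    (fun acc i => acc ++ [pvRowA gamma_dim i]) []

-- ===== PORT B =====
-- the pattern table, chosen by gamma_dim regime (B's if/elif chain, for gamma_dim ≥ 1)
def pvPats (d : Int) : List (List Int) :=
  if d = 1 then [[1], [1], [1]]
  else if d = 2 then [[1, 1], [2, 0], [1, 1]]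
  else [[1, 1], [2, 0, 1, 1], [0, 2, 1, 1]]

def generate_default_gammas_py_alt (gamma_dim : Int) (ndim : Int) : List (List Int) :=
  let m := max (min ndim 3) 0
  if gamma_dim ≤ 0 then (PySem.List.pyRange 0 m 1).map (fun _ => [])
  else ((pvPats gamma_dim).take m.toNat).map
    (fun p => (p ++ List.replicate (gamma_dim - (p.length : Int)).toNat 0).take gamma_dim.toNat)

-- ===== PRECONDITION & SPEC =====
def Spec_generate_default_gammas_py (gamma_dim : Int) (ndim : Int) (out : List (List Int)) : Prop := out = generate_default_gammas_py_alt gamma_dim ndim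
instance (gamma_dim : Int) (ndim : Int) (out : List (List Int)) : Decidable (Spec_generate_default_gammas_py gamma_dim ndim out) := by unfold Spec_generate_default_gammas_py; infer_instance

-- ===== CLAIM (what is proved, stated in full; the proofs are below) =====
def Claim_equal_generate_default_gammas_py : Prop := ∀ (gamma_dim : Int) (ndim : Int), Dom_generate_default_gammas_py gamma_dim ndim → Spec_generate_default_gammas_py gamma_dim ndim (generate_default_gammas_py gamma_dim ndim)

-- ===== LEMMAS AND PROOFS =====

-- B's row for index i (d ≥ 1): the i-th pattern padded/truncated to length d
def pvRowB (d i : Int) : List Int :=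
  ((pvPats d).getD i.toNat [] ++ List.replicate (d - (((pvPats d).getD i.toNat []).length : Int)).toNat 0).take d.toNat

lemma pvMapTailZero (d : Int) (f : Int → Int) (hf : ∀ j, 4 ≤ j → j < d → f j = 0) :
    (PySem.List.pyRange 4 d 1).map f = List.replicate (d-4).toNat 0 := by
  rw [List.eq_replicate_iff]
  refine ⟨by simp [PySem.List.length_pyRange_one], ?_⟩
  intro b hb
  obtain ⟨j, hj, rfl⟩ := List.mem_map.1 hb
  have h := PySem.List.mem_pyRange_one.1 hj
  exact hf j h.1 h.2

lemma pvRowA0 (d : Int) (h4 : 4 ≤ d) :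
    pvRowA d 0 = ([1,1] : List Int) ++ List.replicate (d-2).toNat 0 := by
  have hm : ∀ a : Int, 0 ≤ a → a < d → PySem.Int.mod a d = a := by
    intro a h0 hlt
    rw [PySem.Int.mod_eq_emod_of_pos (by omega)]
    exact Int.emod_eq_of_lt h0 hlt
  simp only [pvRowA]
  norm_num [hm 0 (by omega) (by omega), hm 1 (by omega) (by omega)]
  rw [PySem.List.pyRange_one_append 0 4 d (by omega) (by omega), List.map_append,
    show PySem.List.pyRange 0 4 1 = [0,1,2,3] from by decide,
    pvMapTailZero d _ (fun j hj hjd => by omega),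
    show (d-2).toNat = (d-4).toNat + 2 from by omega]
  norm_num [List.replicate_succ]

lemma pvRowA1 (d : Int) (h4 : 4 ≤ d) :
    pvRowA d 1 = ([2,0,1,1] : List Int) ++ List.replicate (d-4).toNat 0 := by
  have hm : ∀ a : Int, 0 ≤ a → a < d → PySem.Int.mod a d = a := by
    intro a h0 hlt
    rw [PySem.Int.mod_eq_emod_of_pos (by omega)]
    exact Int.emod_eq_of_lt h0 hlt
  simp only [pvRowA]
  norm_num [hm 1 (by omega) (by omega), hm 2 (by omega) (by omega),
    hm 3 (by omega) (by omega), show (1:Int) < d from by omega]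
  rw [PySem.List.pyRange_one_append 0 4 d (by omega) (by omega), List.map_append,
    show PySem.List.pyRange 0 4 1 = [0,1,2,3] from by decide,
    pvMapTailZero d _ (fun j hj hjd => by omega)]
  norm_num

lemma pvRowA2 (d : Int) (h4 : 4 ≤ d) :
    pvRowA d 2 = ([0,2,1,1] : List Int) ++ List.replicate (d-4).toNat 0 := by
  have hm : ∀ a : Int, 0 ≤ a → a < d → PySem.Int.mod a d = a := by
    intro a h0 hlt
    rw [PySem.Int.mod_eq_emod_of_pos (by omega)]
    exact Int.emod_eq_of_lt h0 hlt
  simp only [pvRowA]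
  norm_num [hm 2 (by omega) (by omega), hm 3 (by omega) (by omega),
    show (2:Int) < d from by omega]
  rw [PySem.List.pyRange_one_append 0 4 d (by omega) (by omega), List.map_append,
    show PySem.List.pyRange 0 4 1 = [0,1,2,3] from by decide,
    pvMapTailZero d _ (fun j hj hjd => by omega)]
  norm_num

lemma pvRow_eq (d i : Int) (hd : 0 < d) (hi : i = 0 ∨ i = 1 ∨ i = 2) :
    pvRowA d i = pvRowB d i := by
  obtain rfl | rfl | rfl | h4 : d = 1 ∨ d = 2 ∨ d = 3 ∨ 4 ≤ d := by omega
  · rcases hi with rfl | rfl | rfl <;> decide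
  · rcases hi with rfl | rfl | rfl <;> decide
  · rcases hi with rfl | rfl | rfl <;> decide
  · have hne1 : d ≠ 1 := by omega
    have hne2 : d ≠ 2 := by omega
    rcases hi with rfl | rfl | rfl
    · have hB : pvRowB d 0 = (([1,1] : List Int) ++ List.replicate (d - 2).toNat 0).take d.toNat := by
        simp only [pvRowB, pvPats, if_neg hne1, if_neg hne2]
        rfl
      rw [pvRowA0 d h4, hB, List.take_of_length_le (by simp; omega)]
    · have hB : pvRowB d 1 = (([2,0,1,1] : List Int) ++ List.replicate (d - 4).toNat 0).take d.toNat := by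
        simp only [pvRowB, pvPats, if_neg hne1, if_neg hne2]
        rfl
      rw [pvRowA1 d h4, hB, List.take_of_length_le (by simp; omega)]
    · have hB : pvRowB d 2 = (([0,2,1,1] : List Int) ++ List.replicate (d - 4).toNat 0).take d.toNat := by
        simp only [pvRowB, pvPats, if_neg hne1, if_neg hne2]
        rfl
      rw [pvRowA2 d h4, hB, List.take_of_length_le (by simp; omega)]

lemma pvFoldl_map (d : Int) (l : List Int) (acc : List (List Int)) :
    l.foldl (fun a i => a ++ [pvRowA d i]) acc = acc ++ l.map (pvRowA d) := by
  induction l generalizing acc with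
  | nil => simp
  | cons x xs ih => simp [List.foldl, ih]

-- ===== VERDICT (by name: the statement is the Claim_ definition above) =====
theorem generate_default_gammas_py_spec : Claim_equal_generate_default_gammas_py := by
  intro d n _
  unfold Spec_generate_default_gammas_py generate_default_gammas_py generate_default_gammas_py_alt
  rw [pvFoldl_map, List.nil_append]
  by_cases hd : d ≤ 0
  · -- every A row is the empty list; both sides are (min ndim 3)⁺ copies of []
    have hrow : ∀ i, pvRowA d i = [] := by
      intro i
      simp [pvRowA, PySem.List.pyRange_one_eq_nil hd,
        show ¬ (1:Int) < d from by omega, show ¬ (2:Int) < d from by omega]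
    simp only [hd, if_true]
    rcases (by omega : min n 3 ≤ 0 ∨ 0 < min n 3) with hle | hpos
    · rw [PySem.List.pyRange_one_eq_nil hle,
        PySem.List.pyRange_one_eq_nil (show max (min n 3) 0 ≤ 0 by omega)]
      rfl
    · rw [show max (min n 3) 0 = min n 3 by omega]
      exact List.map_congr_left (fun i _ => hrow i)
  · have hd' : 0 < d := by omega
    simp only [hd, if_false]
    obtain h0 | h1 | h2 | h3 : min n 3 ≤ 0 ∨ min n 3 = 1 ∨ min n 3 = 2 ∨ min n 3 = 3 := by omega
    · rw [PySem.List.pyRange_one_eq_nil h0, show (max (min n 3) 0).toNat = 0 by omega]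
      simp
    · rw [h1, show (max (1:Int) 0).toNat = 1 from by decide,
        show PySem.List.pyRange 0 1 1 = [0] from by decide]
      rw [List.map_cons, List.map_nil, pvRow_eq d 0 hd' (by omega)]
      simp only [pvRowB, pvPats]
      split_ifs <;> rfl
    · rw [h2, show (max (2:Int) 0).toNat = 2 from by decide,
        show PySem.List.pyRange 0 2 1 = [0, 1] from by decide]
      rw [List.map_cons, List.map_cons, List.map_nil,
        pvRow_eq d 0 hd' (by omega), pvRow_eq d 1 hd' (by omega)]
      simp only [pvRowB, pvPats]
      split_ifs <;> rfl
    · rw [h3, show (max (3:Int) 0).toNat = 3 from by decide,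
        show PySem.List.pyRange 0 3 1 = [0, 1, 2] from by decide]
      rw [List.map_cons, List.map_cons, List.map_cons, List.map_nil,
        pvRow_eq d 0 hd' (by omega), pvRow_eq d 1 hd' (by omega), pvRow_eq d 2 hd' (by omega)]
      simp only [pvRowB, pvPats]
      split_ifs <;> rfl
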